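-- pv_equiv track=rewrite | github.com/Alskuu/quarto_game | heuristics.py | line_alive
-- ===== SOURCE A (Python) =====
-- def line_alive(vals):
--     """
--     Vérifie si une ligne est encore "vivante" :
--     c’est-à-dire si les pièces déjà posées partagent au moins un attribut en commun,
--     ce qui laisse une possibilité future de victoire sur cette ligne.
--     """
--     filled = [v for v in vals if v != -1]
--     if len(filled) <= 1:
--         return True
--     for k in range(4):
--         b0 = (filled[0] >> k) & 1
--         if all(((v >> k) & 1) == b0 for v in filled):
--             return True
--     return False
-- ===== SOURCE B (Python) =====
-- def line_alive(vals):
--     """Single-pass column-wise aggregation: AND/OR all filled nibbles instead of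
--     a per-bit scan. A common attribute bit exists iff some bit is set in every
--     filled piece (and_all != 0) or clear in every filled piece (or_all != 0xF)."""
--     and_all, or_all = 0xF, 0
--     for v in vals:
--         if v != -1:
--             and_all &= v & 0xF
--             or_all |= v & 0xF
--     return and_all != 0 or or_all != 0xF
-- ===== Notes on version B (the rewrite author's own statement) =====
-- stated objective: alternative
-- what changed: Replaces the filled-list build plus per-bit scan (4 passes with all(...) and early return) by a single pass maintaining a bitwise AND and OR accumulator over the filled values' low nibbles, deciding liveness from the two aggregates.
import Mathlib
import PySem

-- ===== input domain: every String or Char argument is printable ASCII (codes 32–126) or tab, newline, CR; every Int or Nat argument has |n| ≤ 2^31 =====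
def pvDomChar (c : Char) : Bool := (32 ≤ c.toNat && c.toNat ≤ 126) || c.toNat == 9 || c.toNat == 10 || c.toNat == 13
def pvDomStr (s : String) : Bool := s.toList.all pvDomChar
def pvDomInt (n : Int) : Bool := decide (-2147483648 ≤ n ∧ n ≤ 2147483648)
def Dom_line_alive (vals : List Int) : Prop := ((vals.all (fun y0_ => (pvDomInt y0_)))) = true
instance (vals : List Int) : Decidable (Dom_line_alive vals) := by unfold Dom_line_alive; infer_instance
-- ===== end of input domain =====

-- B replaces A's filled-list build plus per-attribute-bit scan by one pass keeping
-- a bitwise AND and OR accumulator of the filled values' low nibbles (objective: alternative).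

-- ===== PORT A =====
-- Python `(v >> k) & 1`: `>>` is Lean's `>>>` (exact per PySem), `x & 1 = x % 2` ported via PySem.Int.mod (exact)
def line_alive_bit (v : Int) (k : Nat) : Int := PySem.Int.mod (v >>> k) 2

-- the `for k in range(4)` loop with its early `return True`
def line_alive_loop (filled : List Int) (h0 : Int) : List Nat → Bool
  | [] => false
  | k :: ks =>
    let b0 := line_alive_bit h0 k
    if filled.all (fun v => line_alive_bit v k == b0) then true
    else line_alive_loop filled h0 ks

def line_alive (vals : List Int) : Bool :=
  let filled := vals.filter (fun v => v != -1)
  if filled.length ≤ 1 then true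
  else line_alive_loop filled (filled.headD 0) [0, 1, 2, 3]  -- filled[0]: list is nonempty in this branch

-- ===== PORT B =====
-- Python `v & 0xF` is ported exactly as `PySem.Int.mod v 16` (low nibble, two's complement);
-- `&` / `|` on the resulting nonnegative nibbles are Int.land / Int.lor (exact for nonnegative ints)
def line_alive_alt (vals : List Int) : Bool :=
  let p := vals.foldl
    (fun (ao : Int × Int) v =>
      if v != -1 then (Int.land ao.1 (PySem.Int.mod v 16), Int.lor ao.2 (PySem.Int.mod v 16))
      else ao) (15, 0)
  decide (p.1 ≠ 0) || decide (p.2 ≠ 15)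

-- ===== PRECONDITION & SPEC =====
def Spec_line_alive (vals : List Int) (out : Bool) : Prop := out = line_alive_alt vals
instance (vals : List Int) (out : Bool) : Decidable (Spec_line_alive vals out) := by unfold Spec_line_alive; infer_instance

-- ===== CLAIM (what is proved, stated in full; the proofs are below) =====
def Claim_equal_line_alive : Prop := ∀ (vals : List Int), Dom_line_alive vals → Spec_line_alive vals (line_alive vals)

-- ===== LEMMAS AND PROOFS =====

-- the low nibble of v as a natural number
def pvNib (v : Int) : Nat := (PySem.Int.mod v 16).toNat

theorem pvNib_lt (v : Int) : pvNib v < 16 := by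
  unfold pvNib
  rw [PySem.Int.mod_eq_emod_of_pos (by norm_num)]
  omega

theorem pvMod16_eq_nib (v : Int) : PySem.Int.mod v 16 = (pvNib v : Int) := by
  unfold pvNib
  rw [PySem.Int.mod_eq_emod_of_pos (by norm_num)]
  omega

-- B's paired fold splits into two folds over the filtered list
theorem pvFold_split (vals : List Int) (a o : Int) :
    vals.foldl
      (fun (ao : Int × Int) v =>
        if v != -1 then (Int.land ao.1 (PySem.Int.mod v 16), Int.lor ao.2 (PySem.Int.mod v 16))
        else ao) (a, o)
    = ((vals.filter (fun v => v != -1)).foldl (fun x v => Int.land x (PySem.Int.mod v 16)) a,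
       (vals.filter (fun v => v != -1)).foldl (fun x v => Int.lor x (PySem.Int.mod v 16)) o) := by
  induction vals generalizing a o with
  | nil => simp
  | cons v vs ih =>
    cases hb : (v != -1) with
    | false =>
      simp only [List.foldl_cons, List.filter_cons, hb, Bool.false_eq_true, if_false]
      exact ih a o
    | true =>
      simp only [List.foldl_cons, List.filter_cons, hb, if_true]
      exact ih _ _

-- the Int folds are casts of Nat folds over the nibbles
theorem pvFold_and_cast (L : List Int) (a : Nat) :
    L.foldl (fun x v => Int.land x (PySem.Int.mod v 16)) (a : Int)
      = ((L.foldl (fun x v => x &&& pvNib v) a : Nat) : Int) := by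
  induction L generalizing a with
  | nil => rfl
  | cons v vs ih =>
    rw [List.foldl_cons, pvMod16_eq_nib,
      show Int.land (a : Int) ((pvNib v : Nat) : Int) = ((a &&& pvNib v : Nat) : Int) from by
        exact_mod_cast rfl,
      ih, ← List.foldl_cons]

theorem pvFold_or_cast (L : List Int) (o : Nat) :
    L.foldl (fun x v => Int.lor x (PySem.Int.mod v 16)) (o : Int)
      = ((L.foldl (fun x v => x ||| pvNib v) o : Nat) : Int) := by
  induction L generalizing o with
  | nil => rfl
  | cons v vs ih =>
    rw [List.foldl_cons, pvMod16_eq_nib,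
      show Int.lor (o : Int) ((pvNib v : Nat) : Int) = ((o ||| pvNib v : Nat) : Int) from by
        exact_mod_cast rfl,
      ih, ← List.foldl_cons]

theorem pvAnd_testBit (L : List Int) (a : Nat) (k : Nat) :
    (L.foldl (fun x v => x &&& pvNib v) a).testBit k
      = (a.testBit k && L.all (fun v => (pvNib v).testBit k)) := by
  induction L generalizing a with
  | nil => simp
  | cons v vs ih => simp [List.foldl_cons, ih, Nat.testBit_and, Bool.and_assoc]

theorem pvOr_testBit (L : List Int) (o : Nat) (k : Nat) :
    (L.foldl (fun x v => x ||| pvNib v) o).testBit k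
      = (o.testBit k || L.any (fun v => (pvNib v).testBit k)) := by
  induction L generalizing o with
  | nil => simp
  | cons v vs ih => simp [List.foldl_cons, ih, Nat.testBit_or, Bool.or_assoc]

-- A's bit value in terms of the nibble
theorem pvBit_val (v : Int) (k : Nat) (hk : k < 4) :
    line_alive_bit v k = ((pvNib v / 2 ^ k % 2 : Nat) : Int) := by
  unfold line_alive_bit pvNib
  rw [PySem.Int.mod_eq_emod_of_pos (by norm_num), PySem.Int.mod_eq_emod_of_pos (by norm_num),
      Int.shiftRight_eq_div_pow]
  interval_cases k <;> push_cast <;> omega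

theorem pvTestBit_div (n k : Nat) : n.testBit k = decide (n / 2 ^ k % 2 = 1) :=
  Nat.testBit_eq_decide_div_mod_eq

-- A's per-k all-equal test, as testBit conditions
theorem pvAllEq_iff (filled : List Int) (hne : filled ≠ []) (k : Nat) (hk : k < 4) :
    ((filled.all fun v => line_alive_bit v k == line_alive_bit (filled.headD 0) k) = true)
      ↔ ((filled.all fun v => (pvNib v).testBit k) = true
          ∨ (filled.all fun v => !(pvNib v).testBit k) = true) := by
  have hmem : filled.headD 0 ∈ filled := by
    cases filled with
    | nil => exact absurd rfl hne
    | cons x xs => exact List.mem_cons_self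
  simp only [List.all_eq_true, beq_iff_eq, pvBit_val _ k hk, Nat.cast_inj, pvTestBit_div,
    Bool.not_eq_true', decide_eq_true_eq, decide_eq_false_iff_not]
  constructor
  · intro h
    rcases Nat.mod_two_eq_zero_or_one (pvNib (filled.headD 0) / 2 ^ k) with h0 | h0
    · right; intro v hv; rw [h v hv, h0]; omega
    · left; intro v hv; rw [h v hv, h0]
  · rintro (h | h) <;> intro v hv
    · rw [h v hv, h _ hmem]
    · have hv2 : pvNib v / 2 ^ k % 2 < 2 := Nat.mod_lt _ (by norm_num)
      have hh2 : pvNib (filled.headD 0) / 2 ^ k % 2 < 2 := Nat.mod_lt _ (by norm_num)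
      have := h v hv; have := h _ hmem; omega

-- A's k-loop is an `any` over the k list
theorem pvLoop_eq_any (filled : List Int) (h0 : Int) (ks : List Nat) :
    line_alive_loop filled h0 ks
      = ks.any (fun k => filled.all (fun v => line_alive_bit v k == line_alive_bit h0 k)) := by
  induction ks with
  | nil => rfl
  | cons k ks ih =>
    simp only [line_alive_loop, ih, List.any_cons]
    by_cases h : (filled.all fun v => line_alive_bit v k == line_alive_bit h0 k) = true <;> simp [h]

-- 15.testBit k is true exactly for k < 4
theorem pv15_testBit (k : Nat) : (15 : Nat).testBit k = decide (k < 4) := by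
  by_cases hk : k < 4
  · interval_cases k <;> decide
  · simp only [hk, decide_false]
    exact Nat.testBit_lt_two_pow (by calc (15 : Nat) < 2 ^ 4 := by norm_num
                                        _ ≤ 2 ^ k := Nat.pow_le_pow_right (by norm_num) (by omega))

-- the AND aggregate is nonzero iff some bit k < 4 is set in every nibble
theorem pvAnd_ne_zero_iff (L : List Int) :
    L.foldl (fun x v => x &&& pvNib v) 15 ≠ 0
      ↔ ∃ k, k < 4 ∧ (L.all fun v => (pvNib v).testBit k) = true := by
  constructor
  · intro h
    obtain ⟨k, hk⟩ := Nat.exists_testBit_of_ne_zero h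
    rw [pvAnd_testBit, Bool.and_eq_true, pv15_testBit, decide_eq_true_eq] at hk
    exact ⟨k, hk.1, hk.2⟩
  · rintro ⟨k, hk, hall⟩ h0
    have := pvAnd_testBit L 15 k
    rw [h0, Nat.zero_testBit, pv15_testBit, hall, decide_eq_true (p := k < 4) hk] at this
    simp at this

-- the OR aggregate differs from 15 iff some bit k < 4 is clear in every nibble
theorem pvOr_ne_15_iff (L : List Int) :
    L.foldl (fun x v => x ||| pvNib v) 0 ≠ 15
      ↔ ∃ k, k < 4 ∧ (L.all fun v => !(pvNib v).testBit k) = true := by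
  constructor
  · intro h
    by_contra hno
    apply h
    apply Nat.eq_of_testBit_eq
    intro i
    rw [pvOr_testBit, Nat.zero_testBit, Bool.false_or, pv15_testBit]
    by_cases hi : i < 4
    · simp only [hi, decide_true]
      have hx : (L.all fun v => !(pvNib v).testBit i) = false := by
        rcases Bool.eq_false_or_eq_true (L.all fun v => !(pvNib v).testBit i) with hb | hb
        · exact absurd ⟨i, hi, hb⟩ hno
        · exact hb
      obtain ⟨v, hv, hb⟩ := List.all_eq_false.mp hx
      exact List.any_eq_true.mpr ⟨v, hv, by simpa using hb⟩
    · simp only [hi, decide_false, List.any_eq_false]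
      intro v hv
      simp [Nat.testBit_lt_two_pow
        (lt_of_lt_of_le (pvNib_lt v)
          (by calc (16:Nat) = 2 ^ 4 := by norm_num
                _ ≤ 2 ^ i := Nat.pow_le_pow_right (by norm_num) (by omega)))]
  · rintro ⟨k, hk, hall⟩ h15
    have ht := pvOr_testBit L 0 k
    rw [h15, Nat.zero_testBit, Bool.false_or, pv15_testBit, decide_eq_true (p := k < 4) hk] at ht
    obtain ⟨v, hv, hb⟩ := List.any_eq_true.mp ht.symm
    simp only [List.all_eq_true] at hall
    have := hall v hv
    simp [hb] at this

-- ===== VERDICT (by name: the statement is the Claim_ definition above) =====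
theorem line_alive_spec : Claim_equal_line_alive := by
  intro vals _
  unfold Spec_line_alive line_alive line_alive_alt
  rw [pvFold_split]
  rw [show (15 : Int) = ((15 : Nat) : Int) from rfl, show (0 : Int) = ((0 : Nat) : Int) from rfl,
      pvFold_and_cast, pvFold_or_cast]
  generalize vals.filter (fun v => v != -1) = filled
  simp only [ne_eq, Nat.cast_inj]
  by_cases hlen : filled.length ≤ 1
  · rw [if_pos hlen]
    cases filled with
    | nil => simp
    | cons v t =>
      cases t with
      | cons w u => simp at hlen
      | nil =>
        simp only [List.foldl_cons, List.foldl_nil]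
        by_cases h0 : pvNib v = 0
        · simp [h0]
        · have hand : 15 &&& pvNib v = pvNib v := by
            have h1 := Nat.and_two_pow_sub_one_eq_mod (pvNib v) 4
            rw [Nat.and_comm]
            norm_num at h1
            rw [h1, Nat.mod_eq_of_lt (pvNib_lt v)]
          simp [hand, h0]
  · have hne : filled ≠ [] := by intro h; rw [h] at hlen; simp at hlen
    rw [if_neg hlen, pvLoop_eq_any]
    rw [Bool.eq_iff_iff]
    simp only [List.any_cons, List.any_nil, Bool.or_eq_true, Bool.false_eq_true, or_false,
      decide_eq_true_eq, Nat.cast_zero]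
    rw [pvAllEq_iff filled hne 0 (by norm_num), pvAllEq_iff filled hne 1 (by norm_num),
        pvAllEq_iff filled hne 2 (by norm_num), pvAllEq_iff filled hne 3 (by norm_num)]
    have hA := pvAnd_ne_zero_iff filled
    have hO := pvOr_ne_15_iff filled
    simp only [ne_eq] at hA hO
    rw [hA, hO]
    constructor
    · rintro (h | h | h | h) <;> rcases h with h | h
      · exact Or.inl ⟨0, by norm_num, h⟩
      · exact Or.inr ⟨0, by norm_num, h⟩
      · exact Or.inl ⟨1, by norm_num, h⟩
      · exact Or.inr ⟨1, by norm_num, h⟩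
      · exact Or.inl ⟨2, by norm_num, h⟩
      · exact Or.inr ⟨2, by norm_num, h⟩
      · exact Or.inl ⟨3, by norm_num, h⟩
      · exact Or.inr ⟨3, by norm_num, h⟩
    · rintro (⟨k, hk, h⟩ | ⟨k, hk, h⟩) <;> interval_cases k <;> tauto
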